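-- pv_equiv track=rewrite | github.com/kaitlinfrani/Python_Labs | lab-07-kaitlinfrani-main/Lab07Lib.py | replace_str
-- ===== SOURCE A (Python) =====
-- def replace_str(str1, str2, str3):
--     """
--     returns copy of str1 if str2 gets replaced by str3
--
--     Parameters
--     ----------
--     str1 : string
--         copy will be returned based on str2.
--     str2 : string
--         must be of length 1, if in str1, will return str1 and str3 copy.
--     str3 : string
--         will be returned in the copy.
--
--     Returns
--     -------
--     string
--         copy of first parameter.
--
--     """
--     result = ""
--     if str2 not in str1:
--         return str1
--     elif str2 == "":
--         return str3 + str1 + str3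
--
--     else:
--         for i, ch in enumerate(str1):
--             if ch == str2[0]:
--                 if str1[i:i + len(str2)] == str2:
--                     result = str1[:i] + str3 + str1[i + len(str2):]
--         return result
-- ===== SOURCE B (Python) =====
-- def replace_str(str1, str2, str3):
--     if str2 not in str1:
--         return str1
--     if str2 == "":
--         return str3 + str1 + str3
--     for i in range(len(str1) - len(str2), -1, -1):
--         if str1[i:i + len(str2)] == str2:
--             return str1[:i] + str3 + str1[i + len(str2):]
--     return str1  # unreachable: str2 occurs in str1
-- ===== Notes on version B (the rewrite author's own statement) =====
-- stated objective: simpler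
-- what changed: A scans the whole string left to right and overwrites the result at every occurrence so the last one wins; B scans indices downward from len(str1)-len(str2) and returns at the first (rightmost) occurrence, never touching the part of the string left of the answer.
import Mathlib
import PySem

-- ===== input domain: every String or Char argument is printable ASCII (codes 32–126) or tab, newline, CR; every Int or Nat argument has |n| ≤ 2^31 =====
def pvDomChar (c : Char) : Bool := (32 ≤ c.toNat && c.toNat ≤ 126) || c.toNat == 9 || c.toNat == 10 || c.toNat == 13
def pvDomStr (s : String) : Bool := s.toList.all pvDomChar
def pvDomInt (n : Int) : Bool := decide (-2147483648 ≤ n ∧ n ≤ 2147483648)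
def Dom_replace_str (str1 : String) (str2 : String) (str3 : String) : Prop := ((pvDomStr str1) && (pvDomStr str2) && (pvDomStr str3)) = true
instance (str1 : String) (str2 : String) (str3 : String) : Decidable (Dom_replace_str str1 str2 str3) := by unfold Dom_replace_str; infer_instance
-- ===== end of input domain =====

-- B replaces A's full left-to-right scan-and-overwrite with a reverse scan that returns at the
-- first (= rightmost) occurrence; same results, simpler and does not rescan past the answer.

-- ===== PORT A =====
-- literal transliteration of A: result accumulator, guards, then the enumerate loop that
-- overwrites `result` at every occurrence (the last overwrite wins).
def replace_str (str1 : String) (str2 : String) (str3 : String) : String :=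
  let s := str1.toList
  let t := str2.toList
  let r := str3.toList
  -- result = ""
  if PySem.Str.isIn str2 str1 = false then      -- if str2 not in str1: return str1
    str1
  else if str2 == "" then                        -- elif str2 == "": return str3 + str1 + str3
    String.ofList (r ++ s ++ r)
  else
    String.ofList ((PySem.List.enumerate s 0).foldl
      (fun result p =>
        if some p.2 == PySem.List.pyGet? t 0 then        -- if ch == str2[0]  (t ≠ [] in this branch)
          if PySem.List.slice s (some p.1) (some (p.1 + (t.length : Int))) == t then
            PySem.List.slice s none (some p.1) ++ r ++
              PySem.List.slice s (some (p.1 + (t.length : Int))) none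
          else result
        else result)
      [])

-- ===== PORT B =====
-- B's reverse loop: `for i in range(len(str1)-len(str2), -1, -1): if match: return …`
def rsLoop (s t r : List Char) : Nat → List Char
  | 0 =>
    if PySem.List.slice s (some ((0 : Nat) : Int)) (some (((0 : Nat) : Int) + (t.length : Int))) == t then
      PySem.List.slice s none (some ((0 : Nat) : Int)) ++ r ++
        PySem.List.slice s (some (((0 : Nat) : Int) + (t.length : Int))) none
    else s                                       -- fall through the loop: return str1
  | (i + 1) =>
    if PySem.List.slice s (some ((i + 1 : Nat) : Int)) (some (((i + 1 : Nat) : Int) + (t.length : Int))) == t then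
      PySem.List.slice s none (some ((i + 1 : Nat) : Int)) ++ r ++
        PySem.List.slice s (some (((i + 1 : Nat) : Int) + (t.length : Int))) none
    else rsLoop s t r i

def replace_str_alt (str1 : String) (str2 : String) (str3 : String) : String :=
  let s := str1.toList
  let t := str2.toList
  let r := str3.toList
  if PySem.Str.isIn str2 str1 = false then
    str1
  else if str2 == "" then
    String.ofList (r ++ s ++ r)
  else
    String.ofList (rsLoop s t r (s.length - t.length))

-- ===== PRECONDITION & SPEC =====
def Spec_replace_str (str1 : String) (str2 : String) (str3 : String) (out : String) : Prop := out = replace_str_alt str1 str2 str3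
instance (str1 : String) (str2 : String) (str3 : String) (out : String) : Decidable (Spec_replace_str str1 str2 str3 out) := by unfold Spec_replace_str; infer_instance

-- ===== CLAIM (what is proved, stated in full; the proofs are below) =====
def Claim_equal_replace_str : Prop := ∀ (str1 : String) (str2 : String) (str3 : String), Dom_replace_str str1 str2 str3 → Spec_replace_str str1 str2 str3 (replace_str str1 str2 str3)

-- ===== LEMMAS AND PROOFS =====

-- the occurrence test both loops use, and the replacement both build, at index j
def pvQ (s t : List Char) (j : Nat) : Bool :=
  PySem.List.slice s (some (j : Int)) (some ((j : Int) + (t.length : Int))) == t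

def pvRep (s t r : List Char) (j : Nat) : List Char :=
  PySem.List.slice s none (some (j : Int)) ++ r ++
    PySem.List.slice s (some ((j : Int) + (t.length : Int))) none

-- greatest j < k with p j (what A's overwriting fold keeps)
def pvLastHit (p : Nat → Bool) : Nat → Option Nat
  | 0 => none
  | k + 1 => if p k then some k else pvLastHit p k

-- first hit scanning i, i-1, …, 0 (what B's reverse loop finds)
def pvFindDown (p : Nat → Bool) : Nat → Option Nat
  | 0 => if p 0 then some 0 else none
  | i + 1 => if p (i + 1) then some (i + 1) else pvFindDown p i

theorem pvQ_eq_true_iff (s t : List Char) (j : Nat) :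
    pvQ s t j = true ↔ (s.drop j).take t.length = t := by
  have hc : ((j : Int) + (t.length : Int)) = ((j + t.length : Nat) : Int) := by push_cast; ring
  unfold pvQ
  rw [hc, PySem.List.slice_natCast, Nat.add_sub_cancel_left, beq_iff_eq]

theorem pvQ_le (s t : List Char) (j : Nat) (ht : t ≠ []) (h : pvQ s t j = true) :
    j + t.length ≤ s.length := by
  have ht0 : 0 < t.length := List.length_pos_iff.mpr ht
  have h' := (pvQ_eq_true_iff s t j).mp h
  have hlen := congrArg List.length h'
  simp [List.length_take, List.length_drop] at hlen
  omega

theorem pvQ_head (s t : List Char) (j : Nat) (ht : t ≠ []) (h : pvQ s t j = true) :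
    s[j]? = t[0]? := by
  have h' := (pvQ_eq_true_iff s t j).mp h
  have ht0 : 0 < t.length := List.length_pos_iff.mpr ht
  have h0 : t[0]? = ((s.drop j).take t.length)[0]? := by rw [h']
  rw [h0, List.getElem?_take_of_lt ht0, List.getElem?_drop]
  simp

-- B's loop is pvFindDown + pvRep
theorem rsLoop_eq (s t r : List Char) (i : Nat) :
    rsLoop s t r i = match pvFindDown (pvQ s t) i with
      | some j => pvRep s t r j
      | none => s := by
  induction i with
  | zero => simp only [rsLoop, pvFindDown, pvQ, pvRep]; split <;> simp_all
  | succ i ih => simp only [rsLoop, pvFindDown, pvQ, pvRep] at *; split <;> simp_all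

-- A's fold over the first k enumerated characters keeps the replacement at the last hit below k
theorem foldA_eq (s t r : List Char) (ht : t ≠ []) :
    ∀ k, k ≤ s.length → ∀ acc,
      ((PySem.List.enumerate s 0).take k).foldl
        (fun result p =>
          if some p.2 == PySem.List.pyGet? t 0 then
            if PySem.List.slice s (some p.1) (some (p.1 + (t.length : Int))) == t then
              PySem.List.slice s none (some p.1) ++ r ++
                PySem.List.slice s (some (p.1 + (t.length : Int))) none
            else result
          else result)
        acc
      = match pvLastHit (pvQ s t) k with
        | some j => pvRep s t r j
        | none => acc := by
  intro k
  induction k with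
  | zero => intro _ acc; simp [pvLastHit]
  | succ k ih =>
    intro hk acc
    have hk' : k ≤ s.length := Nat.le_of_succ_le hk
    have hkl : k < (PySem.List.enumerate s 0).length := by
      rw [PySem.List.length_enumerate]; omega
    rw [List.take_add_one, List.getElem?_eq_getElem hkl, PySem.List.getElem_enumerate]
    rw [Option.toList_some, List.foldl_append, ih hk']
    simp only [List.foldl_cons, List.foldl_nil, zero_add]
    by_cases hq : pvQ s t k = true
    · -- hit at k: both head-check and slice-check succeed, result overwritten with pvRep k
      have hkn : k < s.length := by
        have := pvQ_le s t k ht hq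
        have ht0 : 0 < t.length := List.length_pos_iff.mpr ht
        omega
      have hhead : (some s[k] == PySem.List.pyGet? t 0) = true := by
        have ht0 : 0 < t.length := List.length_pos_iff.mpr ht
        rw [PySem.List.pyGet?_ofNat' t 0]
        have hh := pvQ_head s t k ht hq
        rw [List.getElem?_eq_getElem hkn] at hh
        rw [← hh, beq_iff_eq]
      have hslice : (PySem.List.slice s (some ((k : Nat) : Int)) (some (((k : Nat) : Int) + (t.length : Int))) == t) = true := by
        simpa [pvQ] using hq
      simp only [pvLastHit, hq, if_true, hhead, hslice, pvRep]
    · -- no hit at k: the inner slice test fails (or the head test does), result kept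
      have hb : pvQ s t k = false := by simpa using hq
      have hslice : (PySem.List.slice s (some ((k : Nat) : Int)) (some (((k : Nat) : Int) + (t.length : Int))) == t) = false := by
        simpa [pvQ] using hb
      simp only [pvLastHit, hb, Bool.false_eq_true, if_false, hslice]
      split <;> simp

theorem pvLastHit_succ_eq_findDown (p : Nat → Bool) : ∀ k, pvLastHit p (k + 1) = pvFindDown p k := by
  intro k
  induction k with
  | zero => simp [pvLastHit, pvFindDown]
  | succ k ih => simp only [pvLastHit, pvFindDown] at *; rw [ih]

theorem pvLastHit_skip (p : Nat → Bool) (a : Nat) (h : ∀ j, a ≤ j → p j = false) :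
    ∀ b, a ≤ b → pvLastHit p b = pvLastHit p a := by
  intro b
  induction b with
  | zero =>
    intro hb
    have ha : a = 0 := by omega
    rw [ha]
  | succ b ih =>
    intro hb
    rcases Nat.lt_or_ge a (b + 1) with hlt | hge
    · have hab : a ≤ b := by omega
      simp only [pvLastHit, h b hab, Bool.false_eq_true, if_false]
      exact ih hab
    · have : a = b + 1 := by omega
      rw [this]

theorem pvFindDown_isSome (p : Nat → Bool) (j : Nat) (hj : p j = true) :
    ∀ i, j ≤ i → (pvFindDown p i).isSome := by
  intro i
  induction i with
  | zero =>
    intro h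
    have : j = 0 := by omega
    subst this; simp [pvFindDown, hj]
  | succ i ih =>
    intro h
    by_cases hp : p (i + 1) = true
    · simp [pvFindDown, hp]
    · have hp' : p (i + 1) = false := by simpa using hp
      have hji : j ≤ i := by
        rcases Nat.lt_or_ge j (i + 1) with hlt | hge
        · omega
        · exfalso; have : j = i + 1 := by omega
          rw [this] at hj; simp [hj] at hp'
      simp only [pvFindDown, hp', Bool.false_eq_true, if_false]
      exact ih hji

theorem replace_str_eq_alt (str1 str2 str3 : String) :
    replace_str str1 str2 str3 = replace_str_alt str1 str2 str3 := by
  by_cases h1 : PySem.Str.isIn str2 str1 = false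
  · simp only [replace_str, replace_str_alt, h1, if_true]
  · by_cases h2 : (str2 == "") = true
    · simp only [replace_str, replace_str_alt, if_neg h1, h2, if_true]
    · have hin : PySem.Str.isIn str2 str1 = true := by simpa using h1
      have h2' : ¬ (str2 == "") = true := h2
      have ht : str2.toList ≠ [] := by
        intro hnil
        exact h2 (by simp [String.toList_eq_nil_iff.mp hnil])
      simp only [replace_str, replace_str_alt, if_neg h1, if_neg h2']
      set s := str1.toList with hs
      set t := str2.toList with htdef
      set r := str3.toList with hr
      have ht0 : 0 < t.length := List.length_pos_iff.mpr ht
      -- an occurrence exists, and every occurrence index is ≤ s.length - t.length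
      have hinf : t <:+: s := (PySem.Str.isIn_iff_infix _ _).mp hin
      obtain ⟨j, hjpre⟩ := (PySem.Chars.exists_prefix_drop_iff_isIn t s).mpr (by
        have : PySem.Chars.isIn t s = PySem.Str.isIn str2 str1 := by
          simp [hs, htdef]
        rw [this, hin])
      have hqj : pvQ s t j = true := by
        rw [pvQ_eq_true_iff]
        exact (List.prefix_iff_eq_take.mp hjpre).symm
      have hjle : j ≤ s.length - t.length := by
        have := pvQ_le s t j ht hqj; omega
      have hbound : ∀ i, s.length - t.length + 1 ≤ i → pvQ s t i = false := by
        intro i hi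
        by_contra hqi
        have hqi' : pvQ s t i = true := by simpa using hqi
        have := pvQ_le s t i ht hqi'
        have := pvQ_le s t j ht hqj
        omega
      congr 1
      have hA := foldA_eq s t r ht s.length (le_refl _) []
      rw [List.take_of_length_le (by simp [PySem.List.length_enumerate])] at hA
      rw [hA, rsLoop_eq]
      have hskip : pvLastHit (pvQ s t) s.length = pvLastHit (pvQ s t) (s.length - t.length + 1) :=
        pvLastHit_skip (pvQ s t) (s.length - t.length + 1) hbound s.length (by
          have := pvQ_le s t j ht hqj; omega)
      rw [hskip, pvLastHit_succ_eq_findDown]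
      have hsome := pvFindDown_isSome (pvQ s t) j hqj (s.length - t.length) hjle
      cases hfd : pvFindDown (pvQ s t) (s.length - t.length) with
      | none => rw [hfd] at hsome; simp at hsome
      | some j' => rfl

-- ===== VERDICT (by name: the statement is the Claim_ definition above) =====
theorem replace_str_spec : Claim_equal_replace_str := by
  intro str1 str2 str3 _
  unfold Spec_replace_str
  exact replace_str_eq_alt str1 str2 str3
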